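-- pv_equiv track=rewrite | github.com/Coff0xc/CTF-MCP | ctf_mcp/tools/reverse.py | find_gadgets_in_hex
-- ===== SOURCE A (Python) =====
-- def find_gadgets_in_hex(hex_data: str, arch: str = "x64") -> str:
--     """Find common ROP gadgets in hex data"""
--     patterns = {
--         "x64": {
--             "pop rdi; ret": "5fc3",
--             "pop rsi; ret": "5ec3",
--             "pop rdx; ret": "5ac3",
--             "pop rax; ret": "58c3",
--             "ret": "c3",
--             "syscall": "0f05",
--             "syscall; ret": "0f05c3",
--             "leave; ret": "c9c3",
--         },
--         "x86": {
--             "pop eax; ret": "58c3",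
--             "pop ebx; ret": "5bc3",
--             "pop ecx; ret": "59c3",
--             "pop edx; ret": "5ac3",
--             "ret": "c3",
--             "int 0x80": "cd80",
--             "leave; ret": "c9c3",
--         },
--     }
--
--     if arch not in patterns:
--         return f"Unknown architecture. Available: {list(patterns.keys())}"
--
--     hex_data = hex_data.lower().replace(" ", "").replace("\\x", "")
--     result = [f"Gadget Search ({arch}):", "-" * 50]
--
--     for name, pattern in patterns[arch].items():
--         idx = 0
--         while True:
--             idx = hex_data.find(pattern, idx)
--             if idx == -1:
--                 break
--             offset = idx // 2
--             result.append(f"  {name} found at offset {offset} (0x{offset:x})")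
--             idx += 1
--
--     if len(result) == 2:
--         result.append("  No gadgets found")
--
--     return '\n'.join(result)
-- ===== SOURCE B (Python) =====
-- # One tagged gadget table + flat comprehension scanning every start index,
-- # instead of per-pattern repeated str.find jump-loops.
-- GADGET_TABLE = [
--     ("x64", "pop rdi; ret", "5fc3"),
--     ("x64", "pop rsi; ret", "5ec3"),
--     ("x64", "pop rdx; ret", "5ac3"),
--     ("x64", "pop rax; ret", "58c3"),
--     ("x64", "ret", "c3"),
--     ("x64", "syscall", "0f05"),
--     ("x64", "syscall; ret", "0f05c3"),
--     ("x64", "leave; ret", "c9c3"),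
--     ("x86", "pop eax; ret", "58c3"),
--     ("x86", "pop ebx; ret", "5bc3"),
--     ("x86", "pop ecx; ret", "59c3"),
--     ("x86", "pop edx; ret", "5ac3"),
--     ("x86", "ret", "c3"),
--     ("x86", "int 0x80", "cd80"),
--     ("x86", "leave; ret", "c9c3"),
-- ]
--
--
-- def find_gadgets_in_hex(hex_data: str, arch: str = "x64") -> str:
--     """Find common ROP gadgets in hex data"""
--     if arch not in ("x64", "x86"):
--         return "Unknown architecture. Available: ['x64', 'x86']"
--
--     s = hex_data.lower().replace(" ", "").replace("\\x", "")
--     body = [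
--         f"  {name} found at offset {i // 2} (0x{i // 2:x})"
--         for (a, name, pattern) in GADGET_TABLE if a == arch
--         for i in range(len(s)) if s.startswith(pattern, i)
--     ]
--     header = [f"Gadget Search ({arch}):", "-" * 50]
--     return "\n".join(header + (body or ["  No gadgets found"]))
-- ===== Notes on version B (the rewrite author's own statement) =====
-- stated objective: alternative
-- what changed: A loops over a per-arch dict of patterns and runs a repeated str.find jump-scan per pattern inside a while loop; B keeps one flat arch-tagged gadget table and builds all lines with a single comprehension that scans every start index with startswith, and falls back to the no-gadgets line when the body list is empty instead of re-checking the result length.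
import Mathlib
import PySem

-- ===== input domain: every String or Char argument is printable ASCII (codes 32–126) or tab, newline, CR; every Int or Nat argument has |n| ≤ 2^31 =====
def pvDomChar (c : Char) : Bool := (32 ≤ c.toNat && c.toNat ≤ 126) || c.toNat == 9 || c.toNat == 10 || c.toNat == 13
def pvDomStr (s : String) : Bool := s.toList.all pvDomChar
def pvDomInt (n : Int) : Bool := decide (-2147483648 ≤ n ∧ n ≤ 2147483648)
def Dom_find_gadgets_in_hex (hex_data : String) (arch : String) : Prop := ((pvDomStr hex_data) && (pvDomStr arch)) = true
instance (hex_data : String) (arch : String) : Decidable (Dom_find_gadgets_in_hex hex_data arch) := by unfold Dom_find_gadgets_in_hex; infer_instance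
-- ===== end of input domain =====

-- B replaces A's per-pattern repeated str.find jump-scan (nested while loops over a per-arch
-- dict) by one flat arch-tagged gadget table and a single comprehension that scans every start
-- index with startswith (objective: alternative decomposition, same cost class).

-- Helpers shared by both ports: both Python versions contain these IDENTICAL expressions
-- (the lower/replace normalisation and the f-string line format).
def pvHexDigit (n : Nat) : Char :=
  (['0','1','2','3','4','5','6','7','8','9','a','b','c','d','e','f']).getD n '0'

-- f"{n:x}" for n ≥ 0 (all offsets in these programs are nonnegative)
def pvHexChars (n : Nat) : List Char :=
  if _h : n < 16 then [pvHexDigit n]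
  else pvHexChars (n / 16) ++ [pvHexDigit (n % 16)]
decreasing_by exact Nat.div_lt_self (by omega) (by omega)

-- f"  {name} found at offset {off} (0x{off:x})"
def pvLine (name : String) (off : Nat) : String :=
  "  " ++ name ++ " found at offset " ++ PySem.Int.toStr (off : Int) ++ " (0x" ++ String.ofList (pvHexChars off) ++ ")"

-- hex_data.lower().replace(" ", "").replace("\\x", "")
def pvNorm (hex_data : String) : List Char :=
  PySem.Chars.replace (PySem.Chars.replace (PySem.Chars.lower hex_data.toList) [' '] []) ['\\','x'] []

-- ===== PORT A =====
-- patterns["x64"].items() / patterns["x86"].items() (dict literals with distinct keys, in insertion order)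
def pvPatsX64 : List (String × List Char) :=
  [("pop rdi; ret", ['5','f','c','3']), ("pop rsi; ret", ['5','e','c','3']),
   ("pop rdx; ret", ['5','a','c','3']), ("pop rax; ret", ['5','8','c','3']),
   ("ret", ['c','3']), ("syscall", ['0','f','0','5']),
   ("syscall; ret", ['0','f','0','5','c','3']), ("leave; ret", ['c','9','c','3'])]

def pvPatsX86 : List (String × List Char) :=
  [("pop eax; ret", ['5','8','c','3']), ("pop ebx; ret", ['5','b','c','3']),
   ("pop ecx; ret", ['5','9','c','3']), ("pop edx; ret", ['5','a','c','3']),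
   ("ret", ['c','3']), ("int 0x80", ['c','d','8','0']), ("leave; ret", ['c','9','c','3'])]

-- A's inner `while True: idx = hex_data.find(pattern, idx) …` loop.  Python's idx is an int that
-- stays ≥ 0, carried here as its Nat value (idx // 2 = idx / 2 on Nat); fuel len+1 bounds the
-- number of iterations (each found index is < len and idx strictly increases).
def pvFindLoop (cs pat : List Char) (name : String) (fuel idx : Nat) (acc : List String) : List String :=
  match fuel with
  | 0 => acc
  | f + 1 =>
    let j := PySem.Chars.findFrom cs pat (idx : Int) none
    if j = -1 then acc
    else pvFindLoop cs pat name f (j.toNat + 1) (acc ++ [pvLine name (j.toNat / 2)])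

def find_gadgets_in_hex (hex_data : String) (arch : String) : String :=
  if !(arch == "x64" || arch == "x86") then
    "Unknown architecture. Available: ['x64', 'x86']"
  else
    let cs := pvNorm hex_data
    let pats := if arch == "x64" then pvPatsX64 else pvPatsX86
    let result := pats.foldl (fun acc np => pvFindLoop cs np.2 np.1 (cs.length + 1) 0 acc)
      ["Gadget Search (" ++ arch ++ "):", "--------------------------------------------------"]
    let result := if result.length == 2 then result ++ ["  No gadgets found"] else result
    PySem.Str.join "\n" result

-- ===== PORT B =====
-- GADGET_TABLE: one flat module-level list of (arch, name, pattern) triples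
def bGadgetTable : List (String × String × List Char) :=
  [("x64", "pop rdi; ret", ['5','f','c','3']),
   ("x64", "pop rsi; ret", ['5','e','c','3']),
   ("x64", "pop rdx; ret", ['5','a','c','3']),
   ("x64", "pop rax; ret", ['5','8','c','3']),
   ("x64", "ret", ['c','3']),
   ("x64", "syscall", ['0','f','0','5']),
   ("x64", "syscall; ret", ['0','f','0','5','c','3']),
   ("x64", "leave; ret", ['c','9','c','3']),
   ("x86", "pop eax; ret", ['5','8','c','3']),
   ("x86", "pop ebx; ret", ['5','b','c','3']),
   ("x86", "pop ecx; ret", ['5','9','c','3']),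
   ("x86", "pop edx; ret", ['5','a','c','3']),
   ("x86", "ret", ['c','3']),
   ("x86", "int 0x80", ['c','d','8','0']),
   ("x86", "leave; ret", ['c','9','c','3'])]

-- B: the list comprehension 'lines for matching table rows, for every start index i with
-- s.startswith(pattern, i)' is filter + flatMap (range/filter/map); 'body or [fallback]'
-- is the isEmpty test.
def find_gadgets_in_hex_alt (hex_data : String) (arch : String) : String :=
  if arch != "x64" && arch != "x86" then
    "Unknown architecture. Available: ['x64', 'x86']"
  else
    let s := pvNorm hex_data
    let body := (bGadgetTable.filter (fun g => g.1 == arch)).flatMap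
      (fun g => ((List.range s.length).filter
          (fun i => PySem.Chars.startswith (s.drop i) g.2.2)).map (fun i => pvLine g.2.1 (i / 2)))
    let header := ["Gadget Search (" ++ arch ++ "):", "--------------------------------------------------"]
    PySem.Str.join "\n" (header ++ (if body.isEmpty then ["  No gadgets found"] else body))

-- ===== PRECONDITION & SPEC =====
def Spec_find_gadgets_in_hex (hex_data : String) (arch : String) (out : String) : Prop := out = find_gadgets_in_hex_alt hex_data arch
instance (hex_data : String) (arch : String) (out : String) : Decidable (Spec_find_gadgets_in_hex hex_data arch out) := by unfold Spec_find_gadgets_in_hex; infer_instance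

-- ===== CLAIM (what is proved, stated in full; the proofs are below) =====
def Claim_equal_find_gadgets_in_hex : Prop := ∀ (hex_data : String) (arch : String), Dom_find_gadgets_in_hex hex_data arch → Spec_find_gadgets_in_hex hex_data arch (find_gadgets_in_hex hex_data arch)

-- ===== LEMMAS AND PROOFS =====

-- Splitting the filtered index range at the first match ≥ k.
theorem pv_filter_range_split (n k j : Nat) (m : Nat → Bool)
    (hkj : k ≤ j) (hj : j < n) (hmj : m j = true)
    (hmin : ∀ i, k ≤ i → i < j → m i = false) :
    (List.range n).filter (fun i => decide (k ≤ i) && m i)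
      = j :: (List.range n).filter (fun i => decide (j + 1 ≤ i) && m i) := by
  have hn : n = (j + 1) + (n - (j + 1)) := by omega
  rw [hn, List.range_add, List.filter_append, List.filter_append, List.range_succ,
      List.filter_append, List.filter_append]
  have h1 : (List.range j).filter (fun i => decide (k ≤ i) && m i) = [] := by
    rw [List.filter_eq_nil_iff]
    intro i hi
    have : i < j := List.mem_range.mp hi
    by_cases hk : k ≤ i
    · simp [hmin i hk this]
    · simp [hk]
  have h1' : (List.range j).filter (fun i => decide (j + 1 ≤ i) && m i) = [] := by
    rw [List.filter_eq_nil_iff]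
    intro i hi
    have hlt : i < j := List.mem_range.mp hi
    have : ¬ (j + 1 ≤ i) := by omega
    simp [this]
  have h2 : [j].filter (fun i => decide (k ≤ i) && m i) = [j] := by simp [hkj, hmj]
  have h2' : [j].filter (fun i => decide (j + 1 ≤ i) && m i) = [] := by simp
  have h3 : ((List.range (n - (j + 1))).map (fun x => (j + 1) + x)).filter (fun i => decide (k ≤ i) && m i)
      = ((List.range (n - (j + 1))).map (fun x => (j + 1) + x)).filter (fun i => decide (j + 1 ≤ i) && m i) := by
    apply List.filter_congr
    intro i hi
    obtain ⟨x, _, rfl⟩ := List.mem_map.mp hi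
    have ha : k ≤ j + 1 + x := by omega
    have hb : j + 1 ≤ j + 1 + x := by omega
    simp [ha, hb]
  rw [h1, h1', h2, h2', h3]
  simp

-- A's while/find loop appends exactly the lines for the matching indices ≥ idx, in order.
theorem pv_findLoop_spec (cs pat : List Char) (name : String) (hpat : pat ≠ []) :
    ∀ (fuel idx : Nat) (acc : List String), idx ≤ cs.length → cs.length - idx < fuel →
    pvFindLoop cs pat name fuel idx acc
      = acc ++ ((List.range cs.length).filter
          (fun i => decide (idx ≤ i) && PySem.Chars.startswith (cs.drop i) pat)).map
          (fun i => pvLine name (i / 2)) := by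
  intro fuel
  induction fuel with
  | zero => intro idx acc _ hf; omega
  | succ f ih =>
    intro idx acc hidx hf
    show (if PySem.Chars.findFrom cs pat (idx : Int) none = -1 then acc
          else pvFindLoop cs pat name f ((PySem.Chars.findFrom cs pat (idx : Int) none).toNat + 1)
            (acc ++ [pvLine name ((PySem.Chars.findFrom cs pat (idx : Int) none).toNat / 2)])) = _
    by_cases hj : PySem.Chars.findFrom cs pat (idx : Int) none = -1
    · rw [if_pos hj]
      have hno : ¬ pat <:+: cs.drop idx :=
        (PySem.Chars.findFrom_natCast_eq_neg_one_iff cs pat idx hidx).mp hj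
      have : (List.range cs.length).filter
          (fun i => decide (idx ≤ i) && PySem.Chars.startswith (cs.drop i) pat) = [] := by
        rw [List.filter_eq_nil_iff]
        intro i _
        by_cases hk : idx ≤ i
        · have hs : PySem.Chars.startswith (cs.drop i) pat = false := by
            refine Bool.eq_false_iff.mpr (fun hb => ?_)
            have hpre : pat <+: cs.drop i := (PySem.Chars.startswith_iff _ _).mp hb
            have hsuf : cs.drop i <:+ cs.drop idx := by
              have hdd : cs.drop i = (cs.drop idx).drop (i - idx) := by
                rw [List.drop_drop]; congr 1; omega
              rw [hdd]; exact List.drop_suffix _ _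
            exact hno ((hpre.isInfix).trans hsuf.isInfix)
          simp [hs]
        · simp [hk]
      rw [this]; simp
    · rw [if_neg hj]
      obtain ⟨hle, hpre, hmin⟩ := PySem.Chars.findFrom_natCast_spec cs pat idx hidx hj
      set j := PySem.Chars.findFrom cs pat (idx : Int) none with hjdef
      have hj0 : 0 ≤ j := le_trans (by exact_mod_cast Int.natCast_nonneg idx) hle
      have hkj : idx ≤ j.toNat := by omega
      have hjlt : j.toNat < cs.length := by
        by_contra h
        have : cs.drop j.toNat = [] := List.drop_eq_nil_iff.mpr (by omega)
        rw [this] at hpre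
        exact hpat (List.prefix_nil.mp hpre)
      rw [ih (j.toNat + 1) _ (by omega) (by omega)]
      rw [pv_filter_range_split cs.length idx j.toNat
            (fun i => PySem.Chars.startswith (cs.drop i) pat) hkj hjlt
            ((PySem.Chars.startswith_iff _ _).mpr hpre)
            (fun i h1 h2 =>
              Bool.eq_false_iff.mpr (fun hb => hmin i h1 h2 ((PySem.Chars.startswith_iff _ _).mp hb)))]
      simp

-- A's fold over a pattern list equals header ++ flatMap of the per-pattern match lines.
theorem pv_fold_eq_flatMap (cs : List Char) (pats : List (String × List Char))
    (hpats : ∀ np ∈ pats, np.2 ≠ []) (init : List String) :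
    pats.foldl (fun acc np => pvFindLoop cs np.2 np.1 (cs.length + 1) 0 acc) init
      = init ++ pats.flatMap (fun np => ((List.range cs.length).filter
          (fun i => PySem.Chars.startswith (cs.drop i) np.2)).map (fun i => pvLine np.1 (i / 2))) := by
  rw [PySem.List.foldl_congr_mem pats _
      (fun acc np => acc ++ ((List.range cs.length).filter
        (fun i => PySem.Chars.startswith (cs.drop i) np.2)).map (fun i => pvLine np.1 (i / 2))) init
      (fun acc np hmem => by
        rw [pv_findLoop_spec cs np.2 np.1 (hpats np hmem) (cs.length + 1) 0 acc (by omega) (by omega)]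
        simp)]
  exact PySem.List.foldl_append_eq_flatMap _ _ _

-- Gluing: header(2) ++ body with A's length test equals header ++ B's isEmpty test.
theorem pv_assemble (h1 h2 : String) (body : List String) :
    (if ([h1, h2] ++ body).length == 2 then ([h1, h2] ++ body) ++ ["  No gadgets found"]
     else [h1, h2] ++ body)
      = [h1, h2] ++ (if body.isEmpty then ["  No gadgets found"] else body) := by
  cases body <;> simp

-- ===== VERDICT (by name: the statement is the Claim_ definition above) =====
theorem find_gadgets_in_hex_spec : Claim_equal_find_gadgets_in_hex := by
  intro hex_data arch _
  unfold Spec_find_gadgets_in_hex find_gadgets_in_hex find_gadgets_in_hex_alt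
  by_cases h64 : arch = "x64"
  · subst h64
    have hbody : (bGadgetTable.filter (fun g => g.1 == "x64")).flatMap
        (fun g => ((List.range (pvNorm hex_data).length).filter
          (fun i => PySem.Chars.startswith ((pvNorm hex_data).drop i) g.2.2)).map (fun i => pvLine g.2.1 (i / 2)))
      = pvPatsX64.flatMap (fun np => ((List.range (pvNorm hex_data).length).filter
          (fun i => PySem.Chars.startswith ((pvNorm hex_data).drop i) np.2)).map (fun i => pvLine np.1 (i / 2))) := by
      simp [bGadgetTable, pvPatsX64]
    simp only [BEq.rfl, String.reduceBEq, String.reduceBNe, Bool.true_or, Bool.not_true,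
      Bool.false_eq_true, if_false, if_true, Bool.false_and]
    rw [pv_fold_eq_flatMap (pvNorm hex_data) pvPatsX64 (by decide), pv_assemble, hbody]
  · by_cases h86 : arch = "x86"
    · subst h86
      have hbody : (bGadgetTable.filter (fun g => g.1 == "x86")).flatMap
          (fun g => ((List.range (pvNorm hex_data).length).filter
            (fun i => PySem.Chars.startswith ((pvNorm hex_data).drop i) g.2.2)).map (fun i => pvLine g.2.1 (i / 2)))
        = pvPatsX86.flatMap (fun np => ((List.range (pvNorm hex_data).length).filter
            (fun i => PySem.Chars.startswith ((pvNorm hex_data).drop i) np.2)).map (fun i => pvLine np.1 (i / 2))) := by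
        simp [bGadgetTable, pvPatsX86]
      simp only [BEq.rfl, String.reduceBEq, String.reduceBNe, Bool.false_or, Bool.not_true,
        Bool.false_eq_true, if_false, Bool.and_false]
      rw [pv_fold_eq_flatMap (pvNorm hex_data) pvPatsX86 (by decide), pv_assemble, hbody]
    · have e64 : (arch == "x64") = false := by simp [h64]
      have e86 : (arch == "x86") = false := by simp [h86]
      simp [e64, e86, bne]
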